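-- pv_equiv track=rewrite | github.com/chowen-zz/neuralmem | src/neuralmem/extraction/code_chunker.py | _extract_js_imports
-- ===== SOURCE A (Python) =====
-- def _extract_js_imports(lines: list[str]) -> str:
--     import_lines: list[str] = []
--     for line in lines:
--         stripped = line.strip()
--         if stripped.startswith("import ") or stripped.startswith("export "):
--             import_lines.append(line)
--         elif stripped.startswith("//") or not stripped:
--             continue
--         else:
--             break
--     return "".join(import_lines)
-- ===== SOURCE B (Python) =====
-- def _extract_js_imports(lines: list[str]) -> str:
--     def _is_header(line: str) -> bool:
--         s = line.strip()
--         return s.startswith(("import ", "export ", "//")) or not s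
--
--     n = 0
--     while n < len(lines) and _is_header(lines[n]):
--         n += 1
--     return "".join(l for l in lines[:n]
--                    if l.strip().startswith(("import ", "export ")))
-- ===== Notes on version B (the rewrite author's own statement) =====
-- stated objective: idiomatic
-- what changed: Replaces the fused accumulate-or-break loop with two stages: a scan that finds the length of the leading header region (import/export/comment/blank lines), then a filter-join comprehension selecting only the import/export lines of that prefix.
import Mathlib
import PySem

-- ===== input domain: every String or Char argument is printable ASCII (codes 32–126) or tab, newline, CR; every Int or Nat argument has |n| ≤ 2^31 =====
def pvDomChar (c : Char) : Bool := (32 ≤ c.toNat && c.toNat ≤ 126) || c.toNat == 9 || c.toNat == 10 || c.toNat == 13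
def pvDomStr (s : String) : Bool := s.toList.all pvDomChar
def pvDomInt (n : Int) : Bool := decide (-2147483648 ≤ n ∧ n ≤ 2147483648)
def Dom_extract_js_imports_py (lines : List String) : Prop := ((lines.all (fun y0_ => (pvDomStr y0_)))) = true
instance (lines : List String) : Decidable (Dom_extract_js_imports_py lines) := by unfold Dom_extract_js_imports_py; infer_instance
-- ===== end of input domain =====

-- B replaces A's fused accumulate-or-break loop with two stages (find the header-region length, then filter-join that prefix); same cost, more idiomatic.

-- ===== PORT A =====
-- the for-loop with break, as structural recursion over the list carrying the accumulator
def extractGoA : List String → List String → List String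
  | [], acc => acc
  | l :: rest, acc =>
    let stripped := PySem.Str.strip l
    if PySem.Str.startswith stripped "import " || PySem.Str.startswith stripped "export " then
      extractGoA rest (acc ++ [l])
    else if PySem.Str.startswith stripped "//" || stripped == "" then
      extractGoA rest acc
    else acc

def extract_js_imports_py (lines : List String) : String :=
  PySem.Str.join "" (extractGoA lines [])

-- ===== PORT B =====
def pvIsHeader (line : String) : Bool :=
  let s := PySem.Str.strip line
  PySem.Str.startswith s "import " || PySem.Str.startswith s "export " ||
    PySem.Str.startswith s "//" || s == ""

def pvIsImport (line : String) : Bool :=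
  let s := PySem.Str.strip line
  PySem.Str.startswith s "import " || PySem.Str.startswith s "export "

-- the 'while n < len(lines) and _is_header(lines[n])' scan, as recursion counting the header prefix
def pvHeadLen : List String → Nat
  | [] => 0
  | l :: rest => if pvIsHeader l then pvHeadLen rest + 1 else 0

def extract_js_imports_py_alt (lines : List String) : String :=
  PySem.Str.join ""
    ((PySem.List.slice lines none (some ((pvHeadLen lines : Nat) : Int))).filter pvIsImport)

-- ===== PRECONDITION & SPEC =====
def Spec_extract_js_imports_py (lines : List String) (out : String) : Prop := out = extract_js_imports_py_alt lines
instance (lines : List String) (out : String) : Decidable (Spec_extract_js_imports_py lines out) := by unfold Spec_extract_js_imports_py; infer_instance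

-- ===== CLAIM (what is proved, stated in full; the proofs are below) =====
def Claim_equal_extract_js_imports_py : Prop := ∀ (lines : List String), Dom_extract_js_imports_py lines → Spec_extract_js_imports_py lines (extract_js_imports_py lines)

-- ===== LEMMAS AND PROOFS =====
lemma goA_eq (lines : List String) :
    ∀ acc, extractGoA lines acc = acc ++ (lines.take (pvHeadLen lines)).filter pvIsImport := by
  induction lines with
  | nil => intro acc; simp only [extractGoA, pvHeadLen, List.take_zero, List.filter_nil, List.append_nil]
  | cons l rest ih =>
    intro acc
    cases h1 : (PySem.Str.startswith (PySem.Str.strip l) "import " ||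
        PySem.Str.startswith (PySem.Str.strip l) "export ") with
    | true =>
      have hi : pvIsImport l = true := by simp only [pvIsImport]; exact h1
      have hh : pvIsHeader l = true := by
        simp only [Bool.or_eq_true] at h1
        simp only [pvIsHeader, Bool.or_eq_true]
        exact Or.inl (Or.inl h1)
      simp only [extractGoA, h1, if_true, pvHeadLen, hh, List.take_succ_cons,
        List.filter_cons, hi, ih, List.append_assoc, List.singleton_append]
    | false =>
      have hi : pvIsImport l = false := by simp only [pvIsImport]; exact h1
      cases h2 : (PySem.Str.startswith (PySem.Str.strip l) "//" ||
          (PySem.Str.strip l == "")) with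
      | true =>
        have hh : pvIsHeader l = true := by
          simp only [Bool.or_eq_true] at h2
          simp only [pvIsHeader, Bool.or_eq_true]
          rcases h2 with h | h
          · exact Or.inl (Or.inr h)
          · exact Or.inr h
        simp only [extractGoA, h1, h2, Bool.false_eq_true, if_false, if_true, pvHeadLen, hh,
          List.take_succ_cons, List.filter_cons, hi, ih]
      | false =>
        have hh : pvIsHeader l = false := by
          obtain ⟨ha, hb⟩ := Bool.or_eq_false_iff.mp h1
          obtain ⟨hc, hd⟩ := Bool.or_eq_false_iff.mp h2
          simp only [pvIsHeader, ha, hb, hc, hd, Bool.or_self]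
        simp only [extractGoA, h1, h2, Bool.false_eq_true, if_false, pvHeadLen, hh,
          List.take_zero, List.filter_nil, List.append_nil]

-- ===== VERDICT (by name: the statement is the Claim_ definition above) =====
theorem extract_js_imports_py_spec : Claim_equal_extract_js_imports_py := by
  intro lines _
  show extract_js_imports_py lines = extract_js_imports_py_alt lines
  unfold extract_js_imports_py extract_js_imports_py_alt
  rw [goA_eq, PySem.List.slice_to_natCast]
  simp only [List.nil_append]
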